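-- pv_equiv track=rewrite | github.com/dimicorn/algo | ysda/1_1_sets_n_dicts/g_double_string.py | solve
-- ===== SOURCE A (Python) =====
-- def solve(n, s, d):
--     ans = ""
--     for i in range(n):
--         check = False
--         for j in range(1, len(s[i])):
--             pref = s[i][:j]
--             suff = s[i][j:len(s[i])]
--             if pref in d and suff in d:
--                 check = True
--
--         if check:
--             ans += '1'
--         else:
--             ans += '0'
--
--     return ans
-- ===== SOURCE B (Python) =====
-- def solve(n, s, d):
--     D = set(d)
--     lens = {len(t) for t in d if t}
--     ans = ""
--     for w in (s[:n] if n > 0 else []):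
--         L = len(w)
--         pref = {j for j in lens if j < L and w[:j] in D}
--         suff = {L - j for j in lens if j < L and w[L - j:] in D}
--         ans += '1' if pref & suff else '0'
--     return ans
-- ===== Notes on version B (the rewrite author's own statement) =====
-- stated objective: alternative
-- what changed: Instead of testing every split point of every string by two membership scans of the dictionary list, B builds a hash set of the dictionary words and the set of their lengths once, and per string marks the split positions realised by a dictionary prefix and by a dictionary suffix, answering by intersecting the two position sets.
-- outside the precondition, e.g. on solve(2, ['ab'], {'a', 'b'}): A raises IndexError, B returns '1'
import Mathlib
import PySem

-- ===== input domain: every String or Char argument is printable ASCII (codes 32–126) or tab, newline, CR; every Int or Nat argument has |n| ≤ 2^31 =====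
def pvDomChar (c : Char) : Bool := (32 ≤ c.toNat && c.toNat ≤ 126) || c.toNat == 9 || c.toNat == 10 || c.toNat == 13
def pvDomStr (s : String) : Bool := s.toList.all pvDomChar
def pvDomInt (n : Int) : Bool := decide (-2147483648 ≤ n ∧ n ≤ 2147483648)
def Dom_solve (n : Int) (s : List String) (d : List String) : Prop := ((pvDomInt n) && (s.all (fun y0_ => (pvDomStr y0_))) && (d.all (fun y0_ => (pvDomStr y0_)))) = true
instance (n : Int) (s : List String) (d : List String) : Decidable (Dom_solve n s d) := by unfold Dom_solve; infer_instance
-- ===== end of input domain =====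

set_option maxHeartbeats 1000000

-- B replaces A's per-split-point dictionary scan by one pass over the dictionary per string,
-- collecting the sets of split positions realised by a dictionary prefix / suffix and
-- intersecting them; return value only, no side effects.

-- ===== PORT A =====
-- inner loop of A: for j in range(1, len(s[i])): if s[i][:j] in d and s[i][j:len(s[i])] in d: check = True
def aCheck (d : List String) (w : String) : Bool :=
  (PySem.List.pyRange 1 (PySem.Str.len w) 1).foldl (fun check j =>
    let pref := PySem.Str.slice w none (some j)
    let suff := PySem.Str.slice w (some j) (some (PySem.Str.len w))
    if d.contains pref && d.contains suff then true else check) false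

def solve (n : Int) (s : List String) (d : List String) : String :=
  (PySem.List.pyRange 0 n 1).foldl (fun ans i =>
    ans ++ (if aCheck d (PySem.List.pyGetD s i "") then "1" else "0")) ""

-- ===== PORT B =====
-- one pass over the dictionary: the pair (good-prefix split positions, good-suffix split positions)
def splitSets (d : List String) (w : String) : PySem.Set Int × PySem.Set Int :=
  d.foldl (fun ps t =>
    let lt := PySem.Str.len t
    if 0 < lt ∧ lt < PySem.Str.len w then
      (if PySem.Str.startswith w t then PySem.Set.add ps.1 lt else ps.1,
       if PySem.Str.endswith w t then PySem.Set.add ps.2 (PySem.Str.len w - lt) else ps.2)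
    else ps) (PySem.Set.empty, PySem.Set.empty)

def solve_alt (n : Int) (s : List String) (d : List String) : String :=
  (if 0 < n then PySem.List.slice s none (some n) else []).foldl (fun ans w =>
    ans ++ (if PySem.Set.inter (splitSets d w).1 (splitSets d w).2 ≠ ([] : List Int) then "1" else "0")) ""

-- ===== PRECONDITION & SPEC =====
-- Pre_ excludes n > len(s), on which A raises IndexError.
def Pre_solve (n : Int) (s : List String) (d : List String) : Prop := n ≤ (s.length : Int)
instance (n : Int) (s : List String) (d : List String) : Decidable (Pre_solve n s d) := by unfold Pre_solve; infer_instance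
def pvWitness_solve : Int × List String × List String := (2, ["ab", "abc"], ["a", "b"])

def Spec_solve (n : Int) (s : List String) (d : List String) (out : String) : Prop := out = solve_alt n s d
instance (n : Int) (s : List String) (d : List String) (out : String) : Decidable (Spec_solve n s d out) := by unfold Spec_solve; infer_instance

-- ===== CLAIM (what is proved, stated in full; the proofs are below) =====
def Claim_equal_solve : Prop := ∀ (n : Int) (s : List String) (d : List String), Dom_solve n s d → Pre_solve n s d → Spec_solve n s d (solve n s d)

-- ===== LEMMAS AND PROOFS =====

-- A's latch loop is an 'any'
theorem foldl_latch {α : Type} (l : List α) (p : α → Bool) (b : Bool) :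
    l.foldl (fun c j => if p j then true else c) b = (b || l.any p) := by
  induction l generalizing b with
  | nil => simp
  | cons x xs ih =>
    simp only [List.foldl_cons, List.any_cons, ih]
    by_cases h : p x = true <;> simp [h]

theorem aCheck_iff (d : List String) (w : String) :
    aCheck d w = true ↔ ∃ j : Int, 1 ≤ j ∧ j < (w.toList.length : Int) ∧
      PySem.Str.slice w none (some j) ∈ d ∧
      PySem.Str.slice w (some j) (some (PySem.Str.len w)) ∈ d := by
  unfold aCheck
  rw [foldl_latch]
  simp [List.any_eq_true, PySem.List.mem_pyRange_one, PySem.Str.len]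
  exact ⟨fun ⟨j, ⟨a, b⟩, c, e⟩ => ⟨j, a, b, c, e⟩, fun ⟨j, a, b, c, e⟩ => ⟨j, ⟨a, b⟩, c, e⟩⟩

-- membership in the two sets B's dictionary pass builds
theorem mem_foldl_split (w : String) (d : List String) (init : PySem.Set Int × PySem.Set Int) (x : Int) :
    (x ∈ (d.foldl (fun ps t =>
      let lt := PySem.Str.len t
      if 0 < lt ∧ lt < PySem.Str.len w then
        (if PySem.Str.startswith w t then PySem.Set.add ps.1 lt else ps.1,
         if PySem.Str.endswith w t then PySem.Set.add ps.2 (PySem.Str.len w - lt) else ps.2)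
      else ps) init).1 ↔ x ∈ init.1 ∨ ∃ t ∈ d, 0 < PySem.Str.len t ∧ PySem.Str.len t < PySem.Str.len w ∧
        PySem.Str.startswith w t = true ∧ x = PySem.Str.len t) ∧
    (x ∈ (d.foldl (fun ps t =>
      let lt := PySem.Str.len t
      if 0 < lt ∧ lt < PySem.Str.len w then
        (if PySem.Str.startswith w t then PySem.Set.add ps.1 lt else ps.1,
         if PySem.Str.endswith w t then PySem.Set.add ps.2 (PySem.Str.len w - lt) else ps.2)
      else ps) init).2 ↔ x ∈ init.2 ∨ ∃ t ∈ d, 0 < PySem.Str.len t ∧ PySem.Str.len t < PySem.Str.len w ∧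
        PySem.Str.endswith w t = true ∧ x = PySem.Str.len w - PySem.Str.len t) := by
  induction d generalizing init with
  | nil => simp
  | cons t ts ih =>
    simp only [List.foldl_cons]
    constructor
    · rw [(ih _).1]
      split_ifs <;> simp_all [PySem.Set.mem_add] <;>
        first
          | tauto
          | (have hns : ¬(0 < t.length ∧ t.length < w.length) := by omega
             constructor
             · tauto
             · rintro (h | h | h) <;> tauto)
    · rw [(ih _).2]
      split_ifs <;> simp_all [PySem.Set.mem_add] <;>
        first
          | tauto
          | (have hns : ¬(0 < t.length ∧ t.length < w.length) := by omega
             constructor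
             · tauto
             · rintro (h | h | h) <;> tauto)

theorem mem_splitSets_fst (d : List String) (w : String) (x : Int) :
    x ∈ (splitSets d w).1 ↔ ∃ t ∈ d, 0 < PySem.Str.len t ∧ PySem.Str.len t < PySem.Str.len w ∧
      PySem.Str.startswith w t = true ∧ x = PySem.Str.len t := by
  unfold splitSets
  rw [(mem_foldl_split w d _ x).1]
  simp [PySem.Set.empty]

theorem mem_splitSets_snd (d : List String) (w : String) (x : Int) :
    x ∈ (splitSets d w).2 ↔ ∃ t ∈ d, 0 < PySem.Str.len t ∧ PySem.Str.len t < PySem.Str.len w ∧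
      PySem.Str.endswith w t = true ∧ x = PySem.Str.len w - PySem.Str.len t := by
  unfold splitSets
  rw [(mem_foldl_split w d _ x).2]
  simp [PySem.Set.empty]

-- a dictionary word t is a proper prefix (suffix) of w of length j (len w - j)  ⇔  t = w[:j] (w[j:])
theorem pref_hsl (w : String) (j : Int) (h1 : 1 ≤ j) :
    (PySem.Str.slice w none (some j)).toList = w.toList.take j.toNat := by
  rw [PySem.Str.toList_slice]
  simp [PySem.List.slice_to _ (by omega : (0:Int) ≤ j)]
theorem suff_hsl (w : String) (j : Int) (h1 : 1 ≤ j) (h2 : j < (w.toList.length : Int)) :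
    (PySem.Str.slice w (some j) (some (PySem.Str.len w))).toList = w.toList.drop j.toNat := by
  rw [PySem.Str.toList_slice]
  simp only [PySem.Chars.slice_eq_listSlice]
  have hlw : PySem.Str.len w = ((w.toList.length : Int)) := by simp
  rw [hlw, PySem.List.slice_toNat _ (by omega : (0:Int) ≤ j) (by omega : (0:Int) ≤ (w.toList.length : Int))]
  rw [List.take_of_length_le (by simp)]
theorem prefix_slice_iff (d : List String) (w : String) (j : Int) (h1 : 1 ≤ j) (h2 : j < (w.toList.length : Int)) :
    PySem.Str.slice w none (some j) ∈ d ↔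
      ∃ t ∈ d, 0 < PySem.Str.len t ∧ PySem.Str.len t < PySem.Str.len w ∧
        PySem.Str.startswith w t = true ∧ (PySem.Str.len t) = j := by
  have hsl := pref_hsl w j h1
  have h2' : j < (w.length : Int) := by simpa using h2
  have hlw : PySem.Str.len w = ((w.toList.length : Int)) := by simp
  have hls : PySem.Str.len (PySem.Str.slice w none (some j)) = j := by
    have h0 : PySem.Str.len (PySem.Str.slice w none (some j))
        = (((PySem.Str.slice w none (some j)).toList.length : Int)) := by simp
    rw [h0, hsl]
    simp
    omega
  constructor
  · intro hmem
    refine ⟨PySem.Str.slice w none (some j), hmem, ?_, ?_, ?_, ?_⟩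
    · rw [hls]; omega
    · rw [hls, hlw]; omega
    · rw [PySem.Str.startswith_eq, PySem.Chars.startswith_iff, hsl]
      exact List.take_prefix _ _
    · rw [hls]
  · rintro ⟨t, ht, h0, hlt, hsw, hlenj⟩
    have hpre : t.toList <+: w.toList := by
      rw [PySem.Str.startswith_eq, PySem.Chars.startswith_iff] at hsw; exact hsw
    have hlt' : PySem.Str.len t = ((t.toList.length : Int)) := by simp
    have hlen : t.toList.length = j.toNat := by
      rw [hlt'] at hlenj; omega
    have heq : t = PySem.Str.slice w none (some j) := by
      rw [← String.toList_inj, hsl, (List.prefix_iff_eq_take).1 hpre, hlen]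
    rwa [← heq]
theorem suffix_slice_iff (d : List String) (w : String) (j : Int) (h1 : 1 ≤ j) (h2 : j < (w.toList.length : Int)) :
    PySem.Str.slice w (some j) (some (PySem.Str.len w)) ∈ d ↔
      ∃ t ∈ d, 0 < PySem.Str.len t ∧ PySem.Str.len t < PySem.Str.len w ∧
        PySem.Str.endswith w t = true ∧ PySem.Str.len w - (PySem.Str.len t) = j := by
  have hsl := suff_hsl w j h1 h2
  have h2' : j < (w.length : Int) := by simpa using h2
  have hlw : PySem.Str.len w = ((w.toList.length : Int)) := by simp
  have hls : PySem.Str.len (PySem.Str.slice w (some j) (some (PySem.Str.len w)))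
      = ((w.toList.length : Int)) - j := by
    have h0 : PySem.Str.len (PySem.Str.slice w (some j) (some (PySem.Str.len w)))
        = (((PySem.Str.slice w (some j) (some (PySem.Str.len w))).toList.length : Int)) := by simp
    rw [h0, hsl]
    simp
    omega
  constructor
  · intro hmem
    refine ⟨PySem.Str.slice w (some j) (some (PySem.Str.len w)), hmem, ?_, ?_, ?_, ?_⟩
    · rw [hls]; omega
    · rw [hls, hlw]; omega
    · rw [PySem.Str.endswith_eq, PySem.Chars.endswith_iff, hsl]
      exact List.drop_suffix _ _
    · rw [hls, hlw]; omega
  · rintro ⟨t, ht, h0, hlt, hsw, hlenj⟩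
    have hsuf : t.toList <:+ w.toList := by
      rw [PySem.Str.endswith_eq, PySem.Chars.endswith_iff] at hsw; exact hsw
    have hlt' : PySem.Str.len t = ((t.toList.length : Int)) := by simp
    have hlen : w.toList.length - t.toList.length = j.toNat := by
      rw [hlt'] at hlenj h0 hlt; rw [hlw] at hlenj hlt; omega
    have heq : t = PySem.Str.slice w (some j) (some (PySem.Str.len w)) := by
      rw [← String.toList_inj, hsl, (List.suffix_iff_eq_drop).1 hsuf, hlen]
    rwa [← heq]

-- the two per-string bits agree
theorem bit_iff (d : List String) (w : String) :
    (aCheck d w = true) ↔ PySem.Set.inter (splitSets d w).1 (splitSets d w).2 ≠ ([] : List Int) := by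
  rw [aCheck_iff]
  rw [ne_eq, List.eq_nil_iff_forall_not_mem]
  push_neg
  constructor
  · rintro ⟨j, h1, h2, hp, hs⟩
    rcases (prefix_slice_iff d w j h1 h2).1 hp with ⟨t, ht, ht1, ht2, ht3, ht4⟩
    refine ⟨j, ?_⟩
    rw [PySem.Set.mem_inter, mem_splitSets_fst, mem_splitSets_snd]
    refine ⟨⟨t, ht, ht1, ht2, ht3, ht4.symm⟩, ?_⟩
    rcases (suffix_slice_iff d w j h1 h2).1 hs with ⟨u, hu, hu1, hu2, hu3, hu4⟩
    exact ⟨u, hu, hu1, hu2, hu3, by omega⟩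
  · rintro ⟨j, hj⟩
    rw [PySem.Set.mem_inter, mem_splitSets_fst, mem_splitSets_snd] at hj
    rcases hj with ⟨⟨t, ht, ht1, ht2, ht3, ht4⟩, ⟨u, hu, hu1, hu2, hu3, hu4⟩⟩
    have hlen : PySem.Str.len w = (w.toList.length : Int) := by
      simp [PySem.Str.len]
    have h1 : 1 ≤ j := by omega
    have h2 : j < (w.toList.length : Int) := by omega
    refine ⟨j, h1, h2, ?_, ?_⟩
    · exact (prefix_slice_iff d w j h1 h2).2 ⟨t, ht, ht1, ht2, ht3, ht4.symm⟩
    · exact (suffix_slice_iff d w j h1 h2).2 ⟨u, hu, hu1, hu2, hu3, by omega⟩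

-- ===== VERDICT (by name: the statement is the Claim_ definition above) =====
theorem solve_spec : Claim_equal_solve := by
  intro n s d _ hpre
  unfold Pre_solve at hpre
  unfold Spec_solve solve solve_alt
  by_cases hn : 0 < n
  · rw [if_pos hn]
    rw [PySem.List.slice_to s (le_of_lt hn)]
    have hlen : (PySem.List.len (s.take n.toNat) : Int) = n := by
      simp [PySem.List.len]
      omega
    calc (PySem.List.pyRange 0 n 1).foldl (fun ans i =>
            ans ++ (if aCheck d (PySem.List.pyGetD s i "") then "1" else "0")) ""
        = (PySem.List.pyRange 0 (PySem.List.len (s.take n.toNat)) 1).foldl (fun ans i =>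
            ans ++ (if aCheck d (PySem.List.pyGetD (s.take n.toNat) i "") then "1" else "0")) "" := by
          rw [hlen]
          apply PySem.List.foldl_congr_mem
          intro acc i hi
          rw [PySem.List.mem_pyRange_one] at hi
          have hi' : i < ((s.take n.toNat).length : Int) := by
            simp; omega
          rw [PySem.List.pyGetD_eq_getElem _ _ hi.1 hi', List.getElem_take,
              PySem.List.pyGetD_eq_getElem _ _ hi.1 (by simp at hi' ⊢; omega)]
      _ = (s.take n.toNat).foldl (fun ans w =>
            ans ++ (if aCheck d w then "1" else "0")) "" := by
          exact PySem.List.foldl_pyRange_zero_pyGetD (s.take n.toNat) "" (fun ans w => ans ++ (if aCheck d w then "1" else "0")) ""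
      _ = (s.take n.toNat).foldl (fun ans w =>
            ans ++ (if PySem.Set.inter (splitSets d w).1 (splitSets d w).2 ≠ ([] : List Int) then "1" else "0")) "" := by
          apply PySem.List.foldl_congr_mem
          intro acc w _
          by_cases h : aCheck d w = true
          · rw [if_pos h, if_pos ((bit_iff d w).1 h)]
          · rw [if_neg (by simpa using h), if_neg (fun hc => h ((bit_iff d w).2 hc))]
  · rw [if_neg hn, PySem.List.pyRange_one_eq_nil (by omega)]
    simp
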